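-- pv_equiv track=rewrite | github.com/BaoXiaoyi1999/SJTU-CS222-2019_2020 | dynamic_programming/dynamic_programming1/weighted_interval_scheduling.py | distinct_end_time
-- ===== SOURCE A (Python) =====
-- def distinct_end_time(job_list):
--     if not job_list:
--         return []
--     start_end_value_list = [(item[1], item[0], item[2]) for item in job_list]
--     start_end_value_list.sort()
--     distinct_list = [start_end_value_list[0]]
--     for i in range(1, len(start_end_value_list)):
--         if start_end_value_list[i][0] == start_end_value_list[i-1][0]:  # start time is the same as the previous one
--             pass
--         else:
--             distinct_list.append(start_end_value_list[i])
--     end_start_value_list = [(item[1], item[0], item[2]) for item in distinct_list]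
--     return end_start_value_list
-- ===== SOURCE B (Python) =====
-- def distinct_end_time(job_list):
--     best = {}
--     for value, start, end in job_list:
--         cur = best.get(start)
--         if cur is None or (value, end) < cur:
--             best[start] = (value, end)
--     result = []
--     for start in sorted(best):
--         value, end = best[start]
--         result.append((value, start, end))
--     return result
-- ===== Notes on version B (the rewrite author's own statement) =====
-- stated objective: alternative
-- what changed: Replaces sort-the-whole-mapped-list-then-scan-adjacent-runs with one linear pass building a dict from each start time to its lexicographically least (value, end) pair, followed by one sorted pass over the distinct keys only.
import Mathlib
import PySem

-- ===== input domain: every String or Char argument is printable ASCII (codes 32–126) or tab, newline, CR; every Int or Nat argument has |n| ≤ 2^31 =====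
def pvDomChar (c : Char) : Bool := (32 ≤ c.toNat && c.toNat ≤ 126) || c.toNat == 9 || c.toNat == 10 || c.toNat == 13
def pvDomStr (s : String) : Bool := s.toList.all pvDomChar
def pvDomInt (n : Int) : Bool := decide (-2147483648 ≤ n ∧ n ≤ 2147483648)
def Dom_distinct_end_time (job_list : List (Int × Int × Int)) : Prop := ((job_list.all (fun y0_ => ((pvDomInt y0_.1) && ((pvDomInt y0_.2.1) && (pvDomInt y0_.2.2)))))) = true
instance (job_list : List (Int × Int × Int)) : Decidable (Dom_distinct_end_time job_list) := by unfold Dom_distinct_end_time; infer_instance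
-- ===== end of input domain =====

-- B replaces A's sort-whole-list-then-drop-adjacent-duplicate-starts with a dict keeping the
-- lexicographically least (value, end) per start time, read out over the sorted keys (alternative algorithm).


-- ===== PORT A =====
-- Python compares triples lexicographically; Lean's Prod order is componentwise, so the sort key
-- goes through Prod.Lex (exact for Python's tuple `<` on int triples).
def pvKeyA (t : Int × Int × Int) : Int ×ₗ (Int ×ₗ Int) := toLex (t.1, toLex (t.2.1, t.2.2))

def distinct_end_time (job_list : List (Int × Int × Int)) : List (Int × Int × Int) :=
  if job_list = [] then []
  else
    -- start_end_value_list = [(item[1], item[0], item[2]) for item in job_list]; .sort()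
    let sev := PySem.List.sorted (job_list.map (fun it => (it.2.1, it.1, it.2.2))) pvKeyA false
    -- distinct_list = [sev[0]]; for i in range(1, len(sev)): append sev[i] unless same start as sev[i-1]
    let dl := (PySem.List.pyRange 1 (sev.length : Int) 1).foldl
      (fun acc i =>
        if (PySem.List.pyGetD sev i ((0:Int),(0:Int),(0:Int))).1
             == (PySem.List.pyGetD sev (i-1) ((0:Int),(0:Int),(0:Int))).1
        then acc
        else acc ++ [PySem.List.pyGetD sev i ((0:Int),(0:Int),(0:Int))])
      [PySem.List.pyGetD sev 0 ((0:Int),(0:Int),(0:Int))]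
    -- [(item[1], item[0], item[2]) for item in distinct_list]
    dl.map (fun it => (it.2.1, it.1, it.2.2))

-- ===== PORT B =====
-- Python tuple `<` on (value, end) pairs is lexicographic.
def pvVELt (a b : Int × Int) : Bool := a.1 < b.1 || (a.1 == b.1 && a.2 < b.2)

-- for value, start, end in job_list: cur = best.get(start); if cur is None or (value,end) < cur: best[start] = (value,end)
def pvBuild (job_list : List (Int × Int × Int)) : PySem.Dict Int (Int × Int) :=
  job_list.foldl
    (fun d j =>
      match d.get? j.2.1 with
      | none => d.insert j.2.1 (j.1, j.2.2)
      | some cur => if pvVELt (j.1, j.2.2) cur then d.insert j.2.1 (j.1, j.2.2) else d)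
    PySem.Dict.empty

def distinct_end_time_alt (job_list : List (Int × Int × Int)) : List (Int × Int × Int) :=
  let best := pvBuild job_list
  -- for start in sorted(best): value, end = best[start]; append (value, start, end)
  (PySem.List.sorted best.keys (fun s => s) false).map
    (fun s => let ve := best.getD s ((0:Int), (0:Int)); (ve.1, s, ve.2))

-- ===== PRECONDITION & SPEC =====
def Spec_distinct_end_time (job_list : List (Int × Int × Int)) (out : List (Int × Int × Int)) : Prop := out = distinct_end_time_alt job_list
instance (job_list : List (Int × Int × Int)) (out : List (Int × Int × Int)) : Decidable (Spec_distinct_end_time job_list out) := by unfold Spec_distinct_end_time; infer_instance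

-- ===== CLAIM (what is proved, stated in full; the proofs are below) =====
def Claim_equal_distinct_end_time : Prop := ∀ (job_list : List (Int × Int × Int)), Dom_distinct_end_time job_list → Spec_distinct_end_time job_list (distinct_end_time job_list)

-- ===== LEMMAS AND PROOFS =====

-- lexicographic (≤) on (value, end) pairs, the Prop twin of pvVELt
def pvVLE (a b : Int × Int) : Prop := a.1 < b.1 ∨ (a.1 = b.1 ∧ a.2 ≤ b.2)

theorem pvVLE_refl (a : Int × Int) : pvVLE a a := by simp [pvVLE]

theorem pvVLE_antisymm {a b : Int × Int} (h1 : pvVLE a b) (h2 : pvVLE b a) : a = b := by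
  rcases a with ⟨a1, a2⟩; rcases b with ⟨b1, b2⟩
  simp only [pvVLE] at h1 h2
  have : a1 = b1 ∧ a2 = b2 := by omega
  simp [this.1, this.2]

theorem pvVELt_iff (a b : Int × Int) : pvVELt a b = true ↔ (a.1 < b.1 ∨ (a.1 = b.1 ∧ a.2 < b.2)) := by
  simp [pvVELt]

theorem pvVLE_of_not_lt {a b : Int × Int} (h : ¬ pvVELt a b = true) : pvVLE b a := by
  rw [pvVELt_iff] at h; simp only [pvVLE]; omega

theorem pvVLE_of_lt {a b : Int × Int} (h : pvVELt a b = true) : pvVLE a b := by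
  rw [pvVELt_iff] at h; simp only [pvVLE]; omega

-- key-order facts
theorem pvKeyA_le_fst {a b : Int × Int × Int} (h : pvKeyA a ≤ pvKeyA b) : a.1 ≤ b.1 := by
  rcases a with ⟨a1, a2, a3⟩; rcases b with ⟨b1, b2, b3⟩
  rcases (Prod.Lex.toLex_le_toLex).1 h with h' | ⟨h1, _⟩
  · exact le_of_lt h'
  · exact le_of_eq h1

theorem pvKeyA_le_snd {a b : Int × Int × Int} (h : pvKeyA a ≤ pvKeyA b) (hfst : a.1 = b.1) :
    pvVLE a.2 b.2 := by
  rcases a with ⟨a1, a2, a3⟩; rcases b with ⟨b1, b2, b3⟩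
  simp only at hfst
  rcases (Prod.Lex.toLex_le_toLex).1 h with h' | ⟨_, h2⟩
  · exact absurd h' (by omega)
  · rcases (Prod.Lex.toLex_le_toLex).1 h2 with h'' | ⟨h3, h4⟩
    · exact Or.inl h''
    · exact Or.inr ⟨h3, h4⟩

-- the structural form of A's adjacent-run scan
def pvChase (p : Int × Int × Int) : List (Int × Int × Int) → List (Int × Int × Int)
  | [] => []
  | x :: t => if x.1 == p.1 then pvChase x t else x :: pvChase x t

-- A's index loop computes pvChase
theorem pvLoopA (xs : List (Int × Int × Int)) :
    ∀ (n k : Nat) (acc : List (Int × Int × Int)), k < xs.length → n = xs.length - (k+1) →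
    (PySem.List.pyRange ((k:Int)+1) (xs.length : Int) 1).foldl
      (fun acc i =>
        if (PySem.List.pyGetD xs i ((0:Int),(0:Int),(0:Int))).1
             == (PySem.List.pyGetD xs (i-1) ((0:Int),(0:Int),(0:Int))).1
        then acc
        else acc ++ [PySem.List.pyGetD xs i ((0:Int),(0:Int),(0:Int))]) acc
    = acc ++ pvChase (xs.getD k ((0:Int),(0:Int),(0:Int))) (xs.drop (k+1)) := by
  intro n
  induction n with
  | zero =>
    intro k acc hk hn
    have hb : (xs.length : Int) ≤ (k:Int) + 1 := by omega
    rw [PySem.List.pyRange_one_eq_nil hb]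
    have hd : xs.drop (k+1) = [] := List.drop_eq_nil_iff.2 (by omega)
    simp [hd, pvChase]
  | succ m ih =>
    intro k acc hk hn
    have hk1 : k + 1 < xs.length := by omega
    rw [PySem.List.pyRange_one_cons (by omega : ((k:Int)+1) < (xs.length : Int))]
    simp only [List.foldl_cons]
    have hget : PySem.List.pyGetD xs ((k:Int)+1) ((0:Int),(0:Int),(0:Int))
        = xs.getD (k+1) ((0:Int),(0:Int),(0:Int)) := by
      rw [show ((k:Int)+1) = ((k+1 : Nat) : Int) by push_cast; ring, PySem.List.pyGetD_natCast]
    have hget' : PySem.List.pyGetD xs ((k:Int)+1-1) ((0:Int),(0:Int),(0:Int))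
        = xs.getD k ((0:Int),(0:Int),(0:Int)) := by
      rw [show ((k:Int)+1-1) = ((k : Nat) : Int) by ring, PySem.List.pyGetD_natCast]
    have hdrop : xs.drop (k+1) = xs.getD (k+1) ((0:Int),(0:Int),(0:Int)) :: xs.drop (k+1+1) := by
      rw [List.drop_eq_getElem_cons hk1, List.getD_eq_getElem xs _ hk1]
    have hcast : ((k:Int)+1+1) = (((k+1:Nat)):Int)+1 := by push_cast; ring
    have ihk := ih (k+1) (if (xs.getD (k+1) ((0:Int),(0:Int),(0:Int))).1
          == (xs.getD k ((0:Int),(0:Int),(0:Int))).1 then acc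
        else acc ++ [xs.getD (k+1) ((0:Int),(0:Int),(0:Int))]) hk1 (by omega)
    rw [hget, hget', hcast] at *
    by_cases hEq : ((xs.getD (k+1) ((0:Int),(0:Int),(0:Int))).1
        == (xs.getD k ((0:Int),(0:Int),(0:Int))).1) = true
    · rw [if_pos hEq] at ihk
      rw [if_pos hEq, ihk, hdrop]
      simp only [pvChase]
      rw [if_pos hEq]
    · rw [if_neg hEq] at ihk
      rw [if_neg hEq, ihk, hdrop]
      simp only [pvChase]
      rw [if_neg hEq, List.append_assoc, List.singleton_append]

-- chase facts, over a list sorted by pvKeyA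
theorem pvChase_subset (p : Int × Int × Int) (t : List (Int × Int × Int)) :
    ∀ y ∈ pvChase p t, y ∈ t := by
  induction t generalizing p with
  | nil => simp [pvChase]
  | cons x t ih =>
    intro y hy
    by_cases h : x.1 = p.1
    · simp only [pvChase, beq_iff_eq, h, if_true] at hy
      exact List.mem_cons_of_mem x (ih x y hy)
    · simp only [pvChase, beq_iff_eq, if_neg h] at hy
      rcases List.mem_cons.1 hy with h' | hy'
      · exact h' ▸ List.mem_cons_self
      · exact List.mem_cons_of_mem x (ih x y hy')

theorem pvChase_fst_lt (p : Int × Int × Int) (t : List (Int × Int × Int))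
    (hs : (p :: t).Pairwise (fun a b => pvKeyA a ≤ pvKeyA b)) :
    ∀ y ∈ pvChase p t, p.1 < y.1 := by
  induction t generalizing p with
  | nil => simp [pvChase]
  | cons x t ih =>
    intro y hy
    rcases List.pairwise_cons.1 hs with ⟨hp, hxt⟩
    have hle : p.1 ≤ x.1 := pvKeyA_le_fst (hp x List.mem_cons_self)
    by_cases h : x.1 = p.1
    · simp only [pvChase, beq_iff_eq, h, ite_true] at hy
      have := ih x hxt y hy
      omega
    · simp only [pvChase, beq_iff_eq, if_neg h] at hy
      rcases List.mem_cons.1 hy with h' | hy'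
      · subst h'; omega
      · have := ih x hxt y hy'
        omega

theorem pvChase_fst_pairwise (p : Int × Int × Int) (t : List (Int × Int × Int))
    (hs : (p :: t).Pairwise (fun a b => pvKeyA a ≤ pvKeyA b)) :
    ((p :: pvChase p t).map (·.1)).Pairwise (· < ·) := by
  induction t generalizing p with
  | nil => simp [pvChase]
  | cons x t ih =>
    rcases List.pairwise_cons.1 hs with ⟨hp, hxt⟩
    have hle : p.1 ≤ x.1 := pvKeyA_le_fst (hp x List.mem_cons_self)
    by_cases h : x.1 = p.1
    · simp only [pvChase, beq_iff_eq, h, ite_true]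
      have hih := ih x hxt
      simp only [List.map_cons, List.pairwise_cons] at hih ⊢
      exact ⟨by simpa [h] using hih.1, hih.2⟩
    · simp only [pvChase, beq_iff_eq, if_neg h]
      have hih := ih x hxt
      simp only [List.map_cons, List.pairwise_cons] at hih ⊢
      refine ⟨?_, hih⟩
      intro b hb
      simp only [List.mem_cons, List.mem_map] at hb
      rcases hb with rfl | ⟨y, hy, rfl⟩
      · omega
      · have := pvChase_fst_lt x t hxt y hy
        omega

theorem pvChase_fst_complete (p : Int × Int × Int) (t : List (Int × Int × Int))
    (hs : (p :: t).Pairwise (fun a b => pvKeyA a ≤ pvKeyA b)) :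
    ∀ x ∈ p :: t, x.1 ∈ (p :: pvChase p t).map (·.1) := by
  induction t generalizing p with
  | nil => simp [pvChase]
  | cons x t ih =>
    rcases List.pairwise_cons.1 hs with ⟨hp, hxt⟩
    intro z hz
    by_cases h : x.1 = p.1
    · simp only [pvChase, beq_iff_eq, h, ite_true]
      rcases List.mem_cons.1 hz with h' | hz'
      · simp [h']
      · have := ih x hxt z hz'
        simp only [List.map_cons, List.mem_cons] at this ⊢
        rcases this with h' | h'
        · exact Or.inl (by omega)
        · exact Or.inr h'
    · simp only [pvChase, beq_iff_eq, if_neg h]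
      rcases List.mem_cons.1 hz with h' | hz'
      · simp [h']
      · have := ih x hxt z hz'
        simp only [List.map_cons, List.mem_cons] at this ⊢
        tauto

theorem pvChase_min (p : Int × Int × Int) (t : List (Int × Int × Int))
    (hs : (p :: t).Pairwise (fun a b => pvKeyA a ≤ pvKeyA b)) :
    ∀ y ∈ p :: pvChase p t, ∀ z ∈ p :: t, z.1 = y.1 → pvVLE y.2 z.2 := by
  induction t generalizing p with
  | nil =>
    intro y hy z hz hfst
    simp only [pvChase, List.mem_singleton] at hy hz
    subst hy; subst hz; exact pvVLE_refl _
  | cons x t ih =>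
    rcases List.pairwise_cons.1 hs with ⟨hp, hxt⟩
    intro y hy z hz hfst
    by_cases h : x.1 = p.1
    · simp only [pvChase, beq_iff_eq, h, ite_true] at hy
      rcases List.mem_cons.1 hy with hyp | hy'
      · subst hyp
        rcases List.mem_cons.1 hz with hzp | hz'
        · subst hzp; exact pvVLE_refl _
        · exact pvKeyA_le_snd (hp z hz') hfst.symm
      · have hylt : x.1 < y.1 := pvChase_fst_lt x t hxt y hy'
        rcases List.mem_cons.1 hz with hzp | hz'
        · exact absurd hfst (by subst hzp; omega)
        · exact ih x hxt y (List.mem_cons_of_mem x hy') z hz' hfst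
    · simp only [pvChase, beq_iff_eq, if_neg h] at hy
      have hplt : p.1 < x.1 := by
        have := pvKeyA_le_fst (hp x List.mem_cons_self); omega
      rcases List.mem_cons.1 hy with hyp | hy'
      · subst hyp
        rcases List.mem_cons.1 hz with hzp | hz'
        · subst hzp; exact pvVLE_refl _
        · exact pvKeyA_le_snd (hp z hz') hfst.symm
      · have hylt : x.1 ≤ y.1 := by
          rcases List.mem_cons.1 hy' with hyx | hy''
          · subst hyx; omega
          · exact le_of_lt (pvChase_fst_lt x t hxt y hy'')
        rcases List.mem_cons.1 hz with hzp | hz'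
        · exact absurd hfst (by subst hzp; omega)
        · exact ih x hxt y hy' z hz' hfst

-- ===== B-side: the dict fold =====

-- the per-key running minimum A BSTRACTION of pvBuild's fold
def pvMerge (o : Option (Int × Int)) (ve : Int × Int) : Int × Int :=
  match o with
  | none => ve
  | some cur => if pvVELt ve cur then ve else cur

def pvUpds (s : Int) (o : Option (Int × Int)) (jl : List (Int × Int × Int)) : Option (Int × Int) :=
  jl.foldl (fun o j => if j.2.1 = s then some (pvMerge o (j.1, j.2.2)) else o) o

theorem pvBuild_get? (jl : List (Int × Int × Int)) :
    ∀ (d : PySem.Dict Int (Int × Int)) (s : Int),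
    (jl.foldl
      (fun d j =>
        match d.get? j.2.1 with
        | none => d.insert j.2.1 (j.1, j.2.2)
        | some cur => if pvVELt (j.1, j.2.2) cur then d.insert j.2.1 (j.1, j.2.2) else d)
      d).get? s = pvUpds s (d.get? s) jl := by
  induction jl with
  | nil => intro d s; simp [pvUpds]
  | cons j t ih =>
    intro d s
    simp only [List.foldl_cons, pvUpds, pvMerge]
    rw [ih]
    congr 1
    by_cases hs : j.2.1 = s
    · subst hs
      cases hget : d.get? j.2.1 with
      | none => simp [PySem.Dict.get?_insert_self]
      | some cur =>
        by_cases hlt : pvVELt (j.1, j.2.2) cur = true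
        · simp [hlt, PySem.Dict.get?_insert_self]
        · simp [hlt, hget]
    · cases hget : d.get? j.2.1 with
      | none => simp [PySem.Dict.get?_insert, hs, Ne.symm hs]
      | some cur =>
        by_cases hlt : pvVELt (j.1, j.2.2) cur = true
        · simp [hlt, PySem.Dict.get?_insert, hs, Ne.symm hs]
        · simp [hlt, hs]

theorem pvBuild_keys (jl : List (Int × Int × Int)) :
    ∀ (d : PySem.Dict Int (Int × Int)),
    (jl.foldl
      (fun d j =>
        match d.get? j.2.1 with
        | none => d.insert j.2.1 (j.1, j.2.2)
        | some cur => if pvVELt (j.1, j.2.2) cur then d.insert j.2.1 (j.1, j.2.2) else d)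
      d).keys = PySem.Set.update d.keys (jl.map (·.2.1)) := by
  induction jl with
  | nil => intro d; simp [PySem.Set.update]
  | cons j t ih =>
    intro d
    simp only [List.foldl_cons, List.map_cons, PySem.Set.update_cons]
    rw [ih]
    congr 1
    cases hget : d.get? j.2.1 with
    | none =>
      have hnc : d.contains j.2.1 = false := (PySem.Dict.get?_eq_none_iff_contains d j.2.1).1 hget
      rw [PySem.Dict.keys_insert_of_not_contains d _ hnc,
        PySem.Set.add_of_not_mem (fun hmem =>
          absurd ((PySem.Dict.contains_iff_mem_keys d j.2.1).2 hmem) (by simp [hnc]))]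
    | some cur =>
      have hct : d.contains j.2.1 = true := by
        rw [PySem.Dict.contains_eq_isSome_get?, hget]; rfl
      have hc : j.2.1 ∈ d.keys := (PySem.Dict.contains_iff_mem_keys d j.2.1).1 hct
      by_cases hlt : pvVELt (j.1, j.2.2) cur = true
      · simp only [hlt, if_true]
        rw [PySem.Dict.keys_insert_of_contains d _ hct, PySem.Set.add_of_mem hc]
      · show (if pvVELt (j.1, j.2.2) cur = true then d.insert j.2.1 (j.1, j.2.2) else d).keys = _
        rw [if_neg hlt, PySem.Set.add_of_mem hc]

-- pvUpds from none computes a minimum (membership + lower bound)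
theorem pvUpds_inv (s : Int) (jl : List (Int × Int × Int)) :
    ∀ (o : Option (Int × Int)) (ve : Int × Int), pvUpds s o jl = some ve →
      (o = some ve ∨ ∃ j ∈ jl, j.2.1 = s ∧ (j.1, j.2.2) = ve) ∧
      (∀ w, o = some w → pvVLE ve w) ∧
      (∀ j ∈ jl, j.2.1 = s → pvVLE ve (j.1, j.2.2)) := by
  induction jl with
  | nil =>
    intro o ve h
    simp only [pvUpds, List.foldl_nil] at h
    exact ⟨Or.inl h, fun w hw => by rw [h] at hw; cases hw; exact pvVLE_refl _, by simp⟩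
  | cons j t ih =>
    intro o ve h
    simp only [pvUpds, List.foldl_cons] at h
    by_cases hs : j.2.1 = s
    · simp only [hs, if_true] at h
      rcases ih _ _ h with ⟨hmem, hlb, hrest⟩
      have hm1 : pvVLE (pvMerge o (j.1, j.2.2)) (j.1, j.2.2) := by
        cases o with
        | none => exact pvVLE_refl _
        | some cur =>
          simp only [pvMerge]
          by_cases hlt : pvVELt (j.1, j.2.2) cur = true
          · simp [hlt, pvVLE_refl]
          · simp only [hlt]
            exact pvVLE_of_not_lt hlt
      have hm2 : ∀ w, o = some w → pvVLE (pvMerge o (j.1, j.2.2)) w := by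
        intro w hw; subst hw
        simp only [pvMerge]
        by_cases hlt : pvVELt (j.1, j.2.2) w = true
        · simp only [hlt, if_true]; exact pvVLE_of_lt hlt
        · simp [hlt, pvVLE_refl]
      have hm3 : pvMerge o (j.1, j.2.2) = (j.1, j.2.2) ∨ ∃ w, o = some w ∧ pvMerge o (j.1, j.2.2) = w := by
        cases o with
        | none => exact Or.inl rfl
        | some cur =>
          simp only [pvMerge]
          by_cases hlt : pvVELt (j.1, j.2.2) cur = true
          · simp [hlt]
          · simp [hlt]
      have hvle_merge : pvVLE ve (pvMerge o (j.1, j.2.2)) := hlb _ rfl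
      refine ⟨?_, ?_, ?_⟩
      · rcases hmem with hmo | ⟨j', hj', hj's, hj've⟩
        · -- ve = merge o (j…)
          have hve : pvMerge o (j.1, j.2.2) = ve := by injection hmo
          rcases hm3 with hm | ⟨w, hw, hm⟩
          · exact Or.inr ⟨j, List.mem_cons_self, hs, by rw [← hve, hm]⟩
          · exact Or.inl (by rw [hw, ← hve, hm])
        · exact Or.inr ⟨j', List.mem_cons_of_mem _ hj', hj's, hj've⟩
      · intro w hw
        rcases hvle_merge with h1 | ⟨h1, h1'⟩ <;> rcases hm2 w hw with h2 | ⟨h2, h2'⟩ <;>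
          simp only [pvVLE] <;> omega
      · intro j' hj' hj's
        rcases List.mem_cons.1 hj' with rfl | hj'mem
        · rcases hvle_merge with h1 | ⟨h1, h1'⟩ <;> rcases hm1 with h2 | ⟨h2, h2'⟩ <;>
            simp only [pvVLE] <;> omega
        · exact hrest j' hj'mem hj's
    · simp only [hs, if_false] at h
      rcases ih _ _ h with ⟨hmem, hlb, hrest⟩
      refine ⟨?_, hlb, ?_⟩
      · rcases hmem with hmo | ⟨j', hj', hj's, hj've⟩
        · exact Or.inl hmo
        · exact Or.inr ⟨j', List.mem_cons_of_mem _ hj', hj's, hj've⟩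
      · intro j' hj' hj's
        rcases List.mem_cons.1 hj' with rfl | hj'mem
        · exact absurd hj's hs
        · exact hrest j' hj'mem hj's

-- the two ports, unfolded (the lets are definitional)
theorem pvA_unfold (jl : List (Int × Int × Int)) (h : ¬ jl = []) :
    distinct_end_time jl =
    ((PySem.List.pyRange 1 ((PySem.List.sorted (jl.map (fun it => (it.2.1, it.1, it.2.2))) pvKeyA false).length : Int) 1).foldl
      (fun acc i =>
        if (PySem.List.pyGetD (PySem.List.sorted (jl.map (fun it => (it.2.1, it.1, it.2.2))) pvKeyA false) i ((0:Int),(0:Int),(0:Int))).1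
             == (PySem.List.pyGetD (PySem.List.sorted (jl.map (fun it => (it.2.1, it.1, it.2.2))) pvKeyA false) (i-1) ((0:Int),(0:Int),(0:Int))).1
        then acc
        else acc ++ [PySem.List.pyGetD (PySem.List.sorted (jl.map (fun it => (it.2.1, it.1, it.2.2))) pvKeyA false) i ((0:Int),(0:Int),(0:Int))])
      [PySem.List.pyGetD (PySem.List.sorted (jl.map (fun it => (it.2.1, it.1, it.2.2))) pvKeyA false) 0 ((0:Int),(0:Int),(0:Int))]).map
      (fun it => (it.2.1, it.1, it.2.2)) := by
  rw [distinct_end_time, if_neg h]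

theorem pvB_unfold (jl : List (Int × Int × Int)) :
    distinct_end_time_alt jl =
    (PySem.List.sorted (pvBuild jl).keys (fun s => s) false).map
      (fun s => (((pvBuild jl).getD s ((0:Int),(0:Int))).1, s, ((pvBuild jl).getD s ((0:Int),(0:Int))).2)) := rfl

-- ===== VERDICT (by name: the statement is the Claim_ definition above) =====
theorem distinct_end_time_spec : Claim_equal_distinct_end_time := by
  intro jl _
  unfold Spec_distinct_end_time
  by_cases hnil : jl = []
  · subst hnil; rfl
  · -- notation
    set f : Int × Int × Int → Int × Int × Int := fun it => (it.2.1, it.1, it.2.2) with hf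
    have hSne : PySem.List.sorted (jl.map f) pvKeyA false ≠ [] := by
      rw [Ne, PySem.List.sorted_eq_nil_iff, List.map_eq_nil_iff]
      exact hnil
    obtain ⟨p, t, hS⟩ : ∃ p t, PySem.List.sorted (jl.map f) pvKeyA false = p :: t := by
      cases hE : PySem.List.sorted (jl.map f) pvKeyA false with
      | nil => exact absurd hE hSne
      | cons p t => exact ⟨p, t, rfl⟩
    have hpw : (p :: t).Pairwise (fun a b => pvKeyA a ≤ pvKeyA b) := by
      rw [← hS]; exact PySem.List.sorted_pairwise _ pvKeyA
    -- membership of the sorted list = membership of jl.map f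
    have hmemS : ∀ y, y ∈ p :: t ↔ y ∈ jl.map f := by
      intro y; rw [← hS]; exact PySem.List.mem_sorted _ pvKeyA false y
    -- A's value
    have hA : distinct_end_time jl = (p :: pvChase p t).map f := by
      rw [pvA_unfold jl hnil, hS]
      have hloop := pvLoopA (p :: t) ((p :: t).length - 1) 0
        [PySem.List.pyGetD (p :: t) 0 ((0:Int),(0:Int),(0:Int))] (by simp) (by simp)
      norm_num at hloop ⊢
      rw [hloop]
      simp [hf]
    -- B's keys
    have hkeys : (pvBuild jl).keys = PySem.Set.ofList (jl.map (fun j => j.2.1)) := by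
      have := pvBuild_keys jl PySem.Dict.empty
      rw [PySem.Dict.keys_empty, PySem.Set.update_nil_left] at this
      exact this
    set dl : List (Int × Int × Int) := p :: pvChase p t with hdl
    set ys : List Int := dl.map (·.1) with hys
    -- dl's elements are elements of jl.map f
    have hdl_memS : ∀ y ∈ dl, y ∈ jl.map f := by
      intro y hy
      rcases List.mem_cons.1 hy with h' | h'
      · exact (hmemS y).1 (h' ▸ List.mem_cons_self)
      · exact (hmemS y).1 (List.mem_cons_of_mem p (pvChase_subset p t y h'))
    -- same membership
    have hmem : ∀ a, a ∈ ys ↔ a ∈ PySem.Set.ofList (jl.map (fun j => j.2.1)) := by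
      intro a
      rw [PySem.Set.mem_ofList]
      constructor
      · intro ha
        rcases List.mem_map.1 ha with ⟨y, hy, rfl⟩
        rcases List.mem_map.1 (hdl_memS y hy) with ⟨j, hj, rfl⟩
        exact List.mem_map.2 ⟨j, hj, rfl⟩
      · intro ha
        rcases List.mem_map.1 ha with ⟨j, hj, rfl⟩
        have hfj : f j ∈ p :: t := (hmemS (f j)).2 (List.mem_map.2 ⟨j, hj, rfl⟩)
        exact pvChase_fst_complete p t hpw (f j) hfj
    -- ys is strictly increasing
    have hpair : ys.Pairwise (· < ·) := pvChase_fst_pairwise p t hpw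
    have hsorted_keys : PySem.List.sorted (pvBuild jl).keys (fun s => s) false = ys := by
      rw [hkeys]
      refine PySem.List.sorted_eq_of_perm_of_pairwise_lt _ _ _ ?_ hpair
      exact (List.perm_ext_iff_of_nodup
        (hpair.imp (fun h => ne_of_lt h)) (PySem.Set.nodup_ofList _)).2 hmem
    -- per-element value agreement
    have hval : ∀ y ∈ dl,
        (((pvBuild jl).getD y.1 ((0:Int),(0:Int))).1, y.1, ((pvBuild jl).getD y.1 ((0:Int),(0:Int))).2) = f y := by
      intro y hy
      -- y.1 is a key of the dict
      have hyk : y.1 ∈ (pvBuild jl).keys := by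
        rw [hkeys]
        exact (hmem y.1).1 (List.mem_map.2 ⟨y, hy, rfl⟩)
      have hget : ∃ ve, (pvBuild jl).get? y.1 = some ve := by
        have hct := (PySem.Dict.contains_iff_mem_keys (pvBuild jl) y.1).2 hyk
        rw [PySem.Dict.contains_eq_isSome_get?] at hct
        exact Option.isSome_iff_exists.1 hct
      rcases hget with ⟨ve, hve⟩
      have hupds : pvUpds y.1 none jl = some ve := by
        have := pvBuild_get? jl PySem.Dict.empty y.1
        rw [PySem.Dict.get?_empty] at this
        rw [← this]; exact hve
      rcases pvUpds_inv y.1 jl none ve hupds with ⟨hmemv, _, hlbv⟩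
      rcases hmemv with hno | ⟨j, hj, hjs, hjve⟩
      · exact absurd hno (by simp)
      · -- ve appears in jl at start y.1; y is a member too
        rcases List.mem_map.1 (hdl_memS y hy) with ⟨jy, hjy, hjyf⟩
        -- y is minimal among sorted elements with its start
        have hymin := pvChase_min p t hpw y hy
        -- f j ∈ p :: t and (f j).1 = y.1
        have hfj : f j ∈ p :: t := (hmemS (f j)).2 (List.mem_map.2 ⟨j, hj, rfl⟩)
        have h1 : pvVLE y.2 ve := by
          have := hymin (f j) hfj (by simpa [hf] using hjs)
          simpa [hf, hjve] using this
        have h2 : pvVLE ve y.2 := by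
          have h := hlbv jy hjy (by rw [← hjyf])
          rw [← hjyf]
          exact h
        have hy2 : y.2 = ve := pvVLE_antisymm h1 h2
        rw [PySem.Dict.getD_of_get?_eq_some _ _ hve, ← hy2, hf]
    -- assemble
    rw [hA, pvB_unfold jl, hsorted_keys, hys, List.map_map]
    exact (List.map_eq_map_iff.2 (fun y hy => (hval y hy).symm)).symm ▸ rfl
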